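-- pv_equiv track=rewrite | github.com/C-Luv9615/harness-agent | skills/experience-summarize/scripts/generate_experience.py | extract_diff_hunks
-- ===== SOURCE A (Python) =====
-- def extract_diff_hunks(diff_text: str, max_hunks: int = 3) -> list:
--     """Extract up to max_hunks diff hunks from a git show output."""
--     hunks = []
--     current_hunk = []
--     in_hunk = False
--
--     for line in diff_text.splitlines():
--         if line.startswith("@@"):
--             if current_hunk and in_hunk:
--                 hunks.append("\n".join(current_hunk))
--                 if len(hunks) >= max_hunks:
--                     break
--             current_hunk = [line]
--             in_hunk = True
--         elif in_hunk:
--             current_hunk.append(line)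
--             # Limit hunk size
--             if len(current_hunk) > 30:
--                 current_hunk.append("... (truncated)")
--                 hunks.append("\n".join(current_hunk))
--                 current_hunk = []
--                 in_hunk = False
--                 if len(hunks) >= max_hunks:
--                     break
--         elif line.startswith("diff --git"):
--             if current_hunk and in_hunk:
--                 hunks.append("\n".join(current_hunk))
--                 if len(hunks) >= max_hunks:
--                     break
--             current_hunk = []
--             in_hunk = False
--
--     # Last hunk
--     if current_hunk and in_hunk and len(hunks) < max_hunks:
--         hunks.append("\n".join(current_hunk))
--
--     return hunks
-- ===== SOURCE B (Python) =====
-- def extract_diff_hunks(diff_text: str, max_hunks: int = 3) -> list: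
--     """Extract up to max_hunks diff hunks from a git show output."""
--     # Phase 1: split the lines into groups, each starting at an '@@' line
--     # (anything before the first '@@' line is discarded).
--     groups = []
--     cur = None
--     for line in diff_text.splitlines():
--         if line.startswith("@@"):
--             if cur is not None:
--                 groups.append(cur)
--             cur = [line]
--         elif cur is not None:
--             cur.append(line)
--     if cur is not None:
--         groups.append(cur)
--     # Phase 2: render the first max_hunks groups, truncating long ones.
--     out = []
--     for g in groups:
--         if len(out) >= max_hunks:
--             break
--         if len(g) >= 31:
--             out.append("\n".join(g[:31] + ["... (truncated)"]))
--         else: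
--             out.append("\n".join(g))
--     return out
-- ===== Notes on version B (the rewrite author's own statement) =====
-- stated objective: simpler
-- what changed: A's single pass with in_hunk/current_hunk state, inline truncation and three break sites is replaced by two plain phases: split the lines into hunk-header-started groups, then render the first max_hunks groups, truncating any group of 31 or more lines.
-- intended difference: When max_hunks <= 0 and the text contains a second hunk-header line or a hunk spanning 31 or more lines, A still returns the first flushed hunk because it checks the cutoff only after appending, while B returns the empty list, which is the intended meaning of a non-positive max_hunks. — e.g. on extract_diff_hunks("@@a\n@@b", 0): A returns ["@@a"], B returns []
import Mathlib
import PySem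

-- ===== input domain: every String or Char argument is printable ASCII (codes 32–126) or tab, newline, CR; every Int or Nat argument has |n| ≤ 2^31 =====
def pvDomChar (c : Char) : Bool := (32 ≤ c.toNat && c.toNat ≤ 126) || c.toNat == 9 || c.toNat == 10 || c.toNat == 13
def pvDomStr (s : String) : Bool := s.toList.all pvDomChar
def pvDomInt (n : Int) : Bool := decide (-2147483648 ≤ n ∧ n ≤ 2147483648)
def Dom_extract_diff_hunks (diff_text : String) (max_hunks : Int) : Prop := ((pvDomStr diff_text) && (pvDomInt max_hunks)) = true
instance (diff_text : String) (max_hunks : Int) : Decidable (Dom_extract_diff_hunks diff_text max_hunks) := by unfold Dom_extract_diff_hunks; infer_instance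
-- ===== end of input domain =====

-- B replaces A's stateful single pass (in_hunk/current_hunk, inline truncation, three break sites)
-- by two plain phases: split the lines into '@@'-started groups, then render the first max_hunks
-- groups, truncating any group of 31+ lines; A and B differ only as stated at D_ below.


-- ===== PORT A =====
-- the for-loop of A: state (hunks, current_hunk, in_hunk); each early `break` returns directly
-- (exact: after every break A's trailing `if` cannot append, since len(hunks) ≥ max_hunks there)
def pvLoopA (mx : Int) : List String → List String → List String → Bool → List String
  | [], hunks, cur, inh =>
      if cur ≠ [] ∧ inh = true ∧ (hunks.length : Int) < mx then hunks ++ [PySem.Str.join "\n" cur] else hunks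
  | line :: rest, hunks, cur, inh =>
      if PySem.Str.startswith line "@@" then
        if cur ≠ [] ∧ inh = true then
          if mx ≤ ((hunks ++ [PySem.Str.join "\n" cur]).length : Int) then hunks ++ [PySem.Str.join "\n" cur]
          else pvLoopA mx rest (hunks ++ [PySem.Str.join "\n" cur]) [line] true
        else pvLoopA mx rest hunks [line] true
      else if inh then
        if 30 < (cur ++ [line]).length then
          if mx ≤ ((hunks ++ [PySem.Str.join "\n" (cur ++ [line] ++ ["... (truncated)"])]).length : Int) then
            hunks ++ [PySem.Str.join "\n" (cur ++ [line] ++ ["... (truncated)"])]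
          else pvLoopA mx rest (hunks ++ [PySem.Str.join "\n" (cur ++ [line] ++ ["... (truncated)"])]) [] false
        else pvLoopA mx rest hunks (cur ++ [line]) true
      else if PySem.Str.startswith line "diff --git" then
        if cur ≠ [] ∧ inh = true then
          if mx ≤ ((hunks ++ [PySem.Str.join "\n" cur]).length : Int) then hunks ++ [PySem.Str.join "\n" cur]
          else pvLoopA mx rest (hunks ++ [PySem.Str.join "\n" cur]) [] false
        else pvLoopA mx rest hunks [] false
      else pvLoopA mx rest hunks cur inh

def pvGatherB : List String → List (List String) → Option (List String) → List (List String)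
  | [], groups, cur => match cur with | some c => groups ++ [c] | none => groups
  | line :: rest, groups, cur =>
      if PySem.Str.startswith line "@@" then
        pvGatherB rest (match cur with | some c => groups ++ [c] | none => groups) (some [line])
      else match cur with
        | some c => pvGatherB rest groups (some (c ++ [line]))
        | none => pvGatherB rest groups none

def pvRenderB : List (List String) → List String → Int → List String
  | [], out, _ => out
  | g :: gs, out, mx =>
      if mx ≤ (out.length : Int) then out
      else pvRenderB gs
        (out ++ [if 31 ≤ g.length then PySem.Str.join "\n" (g.take 31 ++ ["... (truncated)"])
                 else PySem.Str.join "\n" g]) mx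


def extract_diff_hunks (diff_text : String) (max_hunks : Int) : List String :=
  pvLoopA max_hunks (PySem.Str.splitlines diff_text) [] [] false

def extract_diff_hunks_alt (diff_text : String) (max_hunks : Int) : List String :=
  pvRenderB (pvGatherB (PySem.Str.splitlines diff_text) [] none) [] max_hunks

-- ===== PRECONDITION & SPEC =====
-- When max_hunks ≤ 0 and the text contains a second hunk-header line or a hunk spanning 31 or
-- more lines, A still returns the first flushed hunk (it checks the cutoff only after appending),
-- while B returns the empty list, which is the intended meaning of a non-positive max_hunks.
def D_extract_diff_hunks (diff_text : String) (max_hunks : Int) : Prop :=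
  max_hunks ≤ 0 ∧
    (2 ≤ (PySem.Str.splitlines diff_text).countP (fun l => PySem.Str.startswith l "@@") ∨
     ∃ i < (PySem.Str.splitlines diff_text).length,
       PySem.Str.startswith ((PySem.Str.splitlines diff_text)[i]!) "@@" = true ∧
         i + 31 ≤ (PySem.Str.splitlines diff_text).length)
instance (diff_text : String) (max_hunks : Int) : Decidable (D_extract_diff_hunks diff_text max_hunks) := by
  unfold D_extract_diff_hunks; infer_instance

def Spec_extract_diff_hunks (diff_text : String) (max_hunks : Int) (out : List String) : Prop :=
  ¬ D_extract_diff_hunks diff_text max_hunks → out = extract_diff_hunks_alt diff_text max_hunks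
instance (diff_text : String) (max_hunks : Int) (out : List String) : Decidable (Spec_extract_diff_hunks diff_text max_hunks out) := by
  unfold Spec_extract_diff_hunks; infer_instance

def pvDiffWitness_extract_diff_hunks : String × Int := ("@@a\n@@b", 0)
def pvDiffWitnessOut_extract_diff_hunks : (List String) × (List String) := (["@@a"], [])

-- ===== CLAIM (what is proved, stated in full; the proofs are below) =====
def Claim_unchanged_extract_diff_hunks : Prop := ∀ (diff_text : String) (max_hunks : Int), Dom_extract_diff_hunks diff_text max_hunks → Spec_extract_diff_hunks diff_text max_hunks (extract_diff_hunks diff_text max_hunks)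
def Claim_changed_extract_diff_hunks : Prop := Dom_extract_diff_hunks (pvDiffWitness_extract_diff_hunks.1) (pvDiffWitness_extract_diff_hunks.2) ∧ D_extract_diff_hunks (pvDiffWitness_extract_diff_hunks.1) (pvDiffWitness_extract_diff_hunks.2) ∧ extract_diff_hunks (pvDiffWitness_extract_diff_hunks.1) (pvDiffWitness_extract_diff_hunks.2) = pvDiffWitnessOut_extract_diff_hunks.1 ∧ extract_diff_hunks_alt (pvDiffWitness_extract_diff_hunks.1) (pvDiffWitness_extract_diff_hunks.2) = pvDiffWitnessOut_extract_diff_hunks.2 ∧ pvDiffWitnessOut_extract_diff_hunks.1 ≠ pvDiffWitnessOut_extract_diff_hunks.2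
def Claim_exact_extract_diff_hunks : Prop := ∀ (diff_text : String) (max_hunks : Int), Dom_extract_diff_hunks diff_text max_hunks → D_extract_diff_hunks diff_text max_hunks → extract_diff_hunks diff_text max_hunks ≠ extract_diff_hunks_alt diff_text max_hunks

-- ===== LEMMAS AND PROOFS =====

theorem pvRenderB_stop (gs : List (List String)) (out : List String) (mx : Int)
    (h : mx ≤ (out.length : Int)) : pvRenderB gs out mx = out := by
  cases gs <;> simp [pvRenderB, h]

theorem pvGatherB_acc (lines : List String) : ∀ (groups : List (List String)) (cur : Option (List String)),
    pvGatherB lines groups cur = groups ++ pvGatherB lines [] cur := by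
  induction lines with
  | nil => intro groups cur; cases cur <;> simp only [pvGatherB] <;> simp
  | cons line rest ih =>
    intro groups cur
    simp only [pvGatherB]
    by_cases h : PySem.Str.startswith line "@@" = true
    · rw [if_pos h, if_pos h]
      cases cur
      · simp only []; rw [ih]
      · simp only []; rw [ih (groups ++ [_]), ih ([] ++ [_])]; simp
    · rw [if_neg h, if_neg h]
      cases cur
      · simp only []; exact ih groups none
      · simp only []; exact ih groups _

theorem pv_main (lines : List String) :
    (∀ (hunks cur : List String) (mx : Int), cur ≠ [] → cur.length ≤ 30 → (hunks.length : Int) < mx →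
      pvLoopA mx lines hunks cur true = pvRenderB (pvGatherB lines [] (some cur)) hunks mx) ∧
    (∀ (hunks p : List String) (mx : Int), 31 ≤ p.length → (hunks.length : Int) < mx →
      pvRenderB (pvGatherB lines [] (some p)) hunks mx =
        if mx ≤ (hunks.length : Int) + 1 then hunks ++ [PySem.Str.join "\n" (p.take 31 ++ ["... (truncated)"])]
        else pvLoopA mx lines (hunks ++ [PySem.Str.join "\n" (p.take 31 ++ ["... (truncated)"])]) [] false) := by
  induction lines with
  | nil =>
    constructor
    · intro hunks cur mx h1 h2 h3
      rw [pvLoopA, if_pos ⟨h1, rfl, h3⟩]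
      simp only [pvGatherB, List.nil_append]
      rw [pvRenderB, if_neg (by omega), if_neg (by omega), pvRenderB]
    · intro hunks p mx h1 h3
      simp only [pvGatherB, List.nil_append]
      rw [pvRenderB, if_neg (by omega), if_pos (by omega), pvRenderB]
      split_ifs
      · rfl
      · rw [pvLoopA, if_neg (by simp)]
  | cons line rest ih =>
    constructor
    · intro hunks cur mx h1 h2 h3
      by_cases hat : PySem.Str.startswith line "@@" = true
      · have hlenA : ((hunks ++ [PySem.Str.join "\n" cur]).length : Int) = (hunks.length : Int) + 1 := by
          push_cast [List.length_append, List.length_cons, List.length_nil]; ring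
        rw [pvLoopA, if_pos hat, if_pos ⟨h1, rfl⟩, hlenA]
        rw [pvGatherB, if_pos hat, pvGatherB_acc]
        simp only [List.nil_append, List.cons_append]
        rw [pvRenderB, if_neg (not_le.mpr h3), if_neg (show ¬ 31 ≤ cur.length by omega)]
        by_cases hcut : mx ≤ ((hunks.length : Int) + 1)
        · rw [if_pos hcut, pvRenderB_stop _ _ _ (by rw [hlenA]; exact hcut)]
        · rw [if_neg hcut]
          rw [ih.1 _ [line] mx (by simp) (by simp) (by rw [hlenA]; omega)]
      · rw [pvLoopA, if_neg hat, if_pos rfl]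
        rw [pvGatherB, if_neg hat]
        by_cases hlen : 30 < (cur ++ [line]).length
        · have h31 : (cur ++ [line]).take 31 = cur ++ [line] :=
            List.take_of_length_le (by simp; omega)
          rw [if_pos hlen]
          rw [ih.2 hunks (cur ++ [line]) mx (by simp at hlen ⊢; omega) h3]
          rw [h31]
          have hlen' : ((hunks ++ [PySem.Str.join "\n" (cur ++ [line] ++ ["... (truncated)"])]).length : Int) = (hunks.length : Int) + 1 := by
            push_cast [List.length_append, List.length_cons, List.length_nil]; ring
          rw [hlen']
        · rw [if_neg hlen]
          exact ih.1 hunks (cur ++ [line]) mx (by simp) (by simp at hlen ⊢; omega) h3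
    · intro hunks p mx h1 h3
      by_cases hat : PySem.Str.startswith line "@@" = true
      · rw [pvGatherB, if_pos hat, pvGatherB_acc]
        simp only [List.nil_append, List.cons_append]
        rw [pvRenderB, if_neg (not_le.mpr h3), if_pos h1]
        by_cases hcut : mx ≤ ((hunks.length : Int) + 1)
        · rw [if_pos hcut, pvRenderB_stop _ _ _ (by push_cast [List.length_append, List.length_cons, List.length_nil]; omega)]
        · rw [if_neg hcut]
          rw [pvLoopA, if_pos hat, if_neg (by simp)]
          rw [ih.1 _ [line] mx (by simp) (by simp) (by push_cast [List.length_append, List.length_cons, List.length_nil]; omega)]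
      · rw [pvGatherB, if_neg hat]
        have htake : (p ++ [line]).take 31 = p.take 31 := List.take_append_of_le_length h1
        rw [ih.2 hunks (p ++ [line]) mx (by simp; omega) h3, htake]
        split_ifs with hcut
        · rfl
        · rw [pvLoopA, if_neg hat]
          simp only [Bool.false_eq_true, if_false]
          by_cases hd : PySem.Str.startswith line "diff --git" = true
          · rw [if_pos hd, if_neg (by simp)]
          · rw [if_neg hd]

theorem pv_skip (lines : List String) : ∀ (hunks : List String) (mx : Int), (hunks.length : Int) < mx →
    pvLoopA mx lines hunks [] false = pvRenderB (pvGatherB lines [] none) hunks mx := by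
  induction lines with
  | nil =>
    intro hunks mx h3
    rw [pvLoopA, if_neg (by simp), pvGatherB, pvRenderB]
  | cons line rest ih =>
    intro hunks mx h3
    by_cases hat : PySem.Str.startswith line "@@" = true
    · rw [pvLoopA, if_pos hat, if_neg (by simp), pvGatherB, if_pos hat]
      exact (pv_main rest).1 hunks [line] mx (by simp) (by simp) h3
    · rw [pvGatherB, if_neg hat]
      rw [pvLoopA, if_neg hat]
      simp only [Bool.false_eq_true, if_false]
      by_cases hd : PySem.Str.startswith line "diff --git" = true
      · rw [if_pos hd, if_neg (by simp)]
        exact ih hunks mx h3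
      · rw [if_neg hd]
        exact ih hunks mx h3

theorem pvNo1 (lines : List String) : ∀ (hunks cur : List String) (mx : Int), mx ≤ 0 → cur ≠ [] →
    (∀ l ∈ lines, PySem.Str.startswith l "@@" = false) → cur.length + lines.length ≤ 30 →
    pvLoopA mx lines hunks cur true = hunks := by
  induction lines with
  | nil =>
    intro hunks cur mx hm _ _ _
    rw [pvLoopA, if_neg (by omega)]
  | cons line rest ih =>
    intro hunks cur mx hm h1 hno hlen
    have hat : PySem.Str.startswith line "@@" = false := hno line (by simp)
    rw [pvLoopA, if_neg (by simpa using hat), if_pos rfl,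
        if_neg (show ¬ 30 < (cur ++ [line]).length by simp at hlen ⊢; omega)]
    exact ih hunks (cur ++ [line]) mx hm (by simp) (fun l hl => hno l (by simp [hl]))
      (by simp at hlen ⊢; omega)

theorem pvNo0 (lines : List String) : ∀ (hunks : List String) (mx : Int), mx ≤ 0 →
    (lines.countP (fun l => PySem.Str.startswith l "@@") ≤ 1) →
    (∀ i < lines.length, PySem.Str.startswith (lines[i]!) "@@" = true → lines.length < i + 31) →
    pvLoopA mx lines hunks [] false = hunks := by
  induction lines with
  | nil => intro hunks mx hm _ _; rw [pvLoopA, if_neg (by simp)]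
  | cons line rest ih =>
    intro hunks mx hm hc hfar
    by_cases hat : PySem.Str.startswith line "@@" = true
    · rw [pvLoopA, if_pos hat, if_neg (by simp)]
      have hcrest : rest.countP (fun l => PySem.Str.startswith l "@@") = 0 := by
        rw [List.countP_cons, if_pos hat] at hc; omega
      have hnone : ∀ l ∈ rest, PySem.Str.startswith l "@@" = false := by
        intro l hl
        have := List.countP_eq_zero.mp hcrest l hl
        simpa using this
      have hlen : (1 : Nat) + rest.length ≤ 30 := by
        have := hfar 0 (by simp) (by simpa using hat)
        simp at this; omega
      exact pvNo1 rest hunks [line] mx hm (by simp) hnone (by simpa using hlen)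
    · rw [pvLoopA, if_neg hat]
      simp only [Bool.false_eq_true, if_false]
      have hcrest : rest.countP (fun l => PySem.Str.startswith l "@@") ≤ 1 := by
        rw [List.countP_cons, if_neg hat] at hc; omega
      have hfarrest : ∀ i < rest.length, PySem.Str.startswith (rest[i]!) "@@" = true → rest.length < i + 31 := by
        intro i hi hsw
        have h2 := hfar (i + 1) (by simp; omega) (by simpa [List.getElem!_cons_succ] using hsw)
        simp at h2; omega
      by_cases hd : PySem.Str.startswith line "diff --git" = true
      · rw [if_pos hd, if_neg (by simp)]
        exact ih hunks mx hm hcrest hfarrest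
      · rw [if_neg hd]
        exact ih hunks mx hm hcrest hfarrest

theorem pvYes1 (lines : List String) : ∀ (hunks cur : List String) (mx : Int), mx ≤ 0 → cur ≠ [] →
    cur.length ≤ 30 → ((∃ l ∈ lines, PySem.Str.startswith l "@@" = true) ∨ 31 ≤ cur.length + lines.length) →
    ∃ s, pvLoopA mx lines hunks cur true = hunks ++ [s] := by
  induction lines with
  | nil =>
    intro hunks cur mx hm h1 h2 hfe
    exfalso
    rcases hfe with ⟨l, hl, _⟩ | h
    · simp at hl
    · simp at h; omega
  | cons line rest ih =>
    intro hunks cur mx hm h1 h2 hfe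
    by_cases hat : PySem.Str.startswith line "@@" = true
    · refine ⟨PySem.Str.join "\n" cur, ?_⟩
      rw [pvLoopA, if_pos hat, if_pos ⟨h1, rfl⟩, if_pos (by push_cast [List.length_append]; omega)]
    · rw [pvLoopA, if_neg hat, if_pos rfl]
      by_cases hlen : 30 < (cur ++ [line]).length
      · rw [if_pos hlen, if_pos (by push_cast [List.length_append]; omega)]
        exact ⟨_, rfl⟩
      · rw [if_neg hlen]
        refine ih hunks (cur ++ [line]) mx hm (by simp) (by simp at hlen ⊢; omega) ?_
        rcases hfe with ⟨l, hl, hsw⟩ | h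
        · rcases List.mem_cons.mp hl with rfl | hl'
          · exact absurd hsw hat
          · exact Or.inl ⟨l, hl', hsw⟩
        · right; simp at h ⊢; omega

theorem pvYes0 (lines : List String) : ∀ (hunks : List String) (mx : Int), mx ≤ 0 →
    (2 ≤ lines.countP (fun l => PySem.Str.startswith l "@@") ∨
     ∃ i < lines.length, PySem.Str.startswith (lines[i]!) "@@" = true ∧ i + 31 ≤ lines.length) →
    ∃ s, pvLoopA mx lines hunks [] false = hunks ++ [s] := by
  induction lines with
  | nil =>
    intro hunks mx hm hfe
    exfalso
    rcases hfe with h | ⟨i, hi, _⟩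
    · simp at h
    · simp at hi
  | cons line rest ih =>
    intro hunks mx hm hfe
    by_cases hat : PySem.Str.startswith line "@@" = true
    · rw [pvLoopA, if_pos hat, if_neg (by simp)]
      refine pvYes1 rest hunks [line] mx hm (by simp) (by simp) ?_
      by_cases hex : ∃ l ∈ rest, PySem.Str.startswith l "@@" = true
      · exact Or.inl hex
      · right
        have hcrest : rest.countP (fun l => PySem.Str.startswith l "@@") = 0 := by
          rw [List.countP_eq_zero]
          intro l hl h
          exact hex ⟨l, hl, h⟩
        rcases hfe with h | ⟨i, hi, hsw, hfar⟩
        · rw [List.countP_cons, if_pos hat] at h; omega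
        · rcases Nat.eq_zero_or_pos i with rfl | hpos
          · simp at hfar ⊢; omega
          · exfalso
            obtain ⟨j, rfl⟩ := Nat.exists_eq_add_of_lt hpos
            have hj : j + 1 - 1 < rest.length := by simp at hi; omega
            have : PySem.Str.startswith (rest[0 + j]!) "@@" = true := by
              simpa [List.getElem!_cons_succ] using hsw
            have hmem : rest[0 + j]! ∈ rest := by
              have hjlen : 0 + j < rest.length := by simp at hi; omega
              rw [getElem!_pos rest (0 + j) hjlen]
              exact List.getElem_mem hjlen
            exact hex ⟨_, hmem, this⟩
    · rw [pvLoopA, if_neg hat]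
      simp only [Bool.false_eq_true, if_false]
      have hfe' : 2 ≤ rest.countP (fun l => PySem.Str.startswith l "@@") ∨
          ∃ i < rest.length, PySem.Str.startswith (rest[i]!) "@@" = true ∧ i + 31 ≤ rest.length := by
        rcases hfe with h | ⟨i, hi, hsw, hfar⟩
        · left
          rw [List.countP_cons, if_neg hat] at h; omega
        · right
          rcases Nat.eq_zero_or_pos i with rfl | hpos
          · exact absurd (by simpa [List.getElem!_cons_zero] using hsw) hat
          · obtain ⟨j, rfl⟩ := Nat.exists_eq_add_of_lt hpos
            refine ⟨j, by simp at hi; omega, ?_, by simp at hfar; omega⟩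
            simpa [List.getElem!_cons_succ] using hsw
      by_cases hd : PySem.Str.startswith line "diff --git" = true
      · rw [if_pos hd, if_neg (by simp)]
        exact ih hunks mx hm hfe'
      · rw [if_neg hd]
        exact ih hunks mx hm hfe'

-- with max_hunks ≤ 0, B returns []
theorem pvB_empty (gs : List (List String)) (mx : Int) (h : mx ≤ 0) : pvRenderB gs [] mx = [] :=
  pvRenderB_stop gs [] mx (by simpa using h)

-- ===== VERDICT (by name: the statement is the Claim_ definition above) =====
theorem extract_diff_hunks_spec : Claim_unchanged_extract_diff_hunks := by
  intro diff_text max_hunks _ hnD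
  unfold extract_diff_hunks extract_diff_hunks_alt
  by_cases hmx : 0 < max_hunks
  · exact pv_skip _ [] max_hunks (by simpa using hmx)
  · have hm : max_hunks ≤ 0 := by omega
    unfold D_extract_diff_hunks at hnD
    have hX : ¬ (2 ≤ (PySem.Str.splitlines diff_text).countP (fun l => PySem.Str.startswith l "@@") ∨
        ∃ i < (PySem.Str.splitlines diff_text).length,
          PySem.Str.startswith ((PySem.Str.splitlines diff_text)[i]!) "@@" = true ∧
            i + 31 ≤ (PySem.Str.splitlines diff_text).length) := fun hx => hnD ⟨hm, hx⟩
    rw [pvB_empty _ _ hm]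
    refine pvNo0 _ [] max_hunks hm ?_ ?_
    · by_contra h
      exact hX (Or.inl (by omega))
    · intro i hi hsw
      by_contra h
      exact hX (Or.inr ⟨i, hi, hsw, by omega⟩)

theorem extract_diff_hunks_changed : Claim_changed_extract_diff_hunks := by
  unfold Claim_changed_extract_diff_hunks; decide

theorem extract_diff_hunks_tight : Claim_exact_extract_diff_hunks := by
  intro diff_text max_hunks _ hD
  unfold D_extract_diff_hunks at hD
  obtain ⟨hm, hX⟩ := hD
  unfold extract_diff_hunks extract_diff_hunks_alt
  obtain ⟨s, hs⟩ := pvYes0 (PySem.Str.splitlines diff_text) [] max_hunks hm hX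
  rw [hs, pvB_empty _ _ hm]
  simp
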